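-- pv_equiv track=rewrite | github.com/satoshi25/Algorithm | 2023-12/1209-Baekjoon/1209_5555.py | check_ring
-- ===== SOURCE A (Python) =====
-- def check_ring(ring_str, find_str):
--     limit = len(ring_str)
--     find_cnt = len(find_str)
--     cur_list = list(ring_str)[:find_cnt]
--     is_valid = False
--
--     for i in range(find_cnt, limit + find_cnt + 1):
--         if "".join(cur_list) == find_str:
--             is_valid = True
--             break
--         cur_list.pop(0)
--         cur_list.append(ring_str[i % limit])
--
--     return is_valid
-- ===== SOURCE B (Python) =====
-- def check_ring(ring_str, find_str):
--     return len(find_str) <= len(ring_str) and find_str in ring_str + ring_str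
-- ===== Notes on version B (the rewrite author's own statement) =====
-- stated objective: faster
-- what changed: B replaces A's explicit sliding-window loop (rebuilding and comparing a length-m window at each of the n+1 circular positions) by a single native substring search of find_str in ring_str+ring_str, guarded by a length check.
import Mathlib
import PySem

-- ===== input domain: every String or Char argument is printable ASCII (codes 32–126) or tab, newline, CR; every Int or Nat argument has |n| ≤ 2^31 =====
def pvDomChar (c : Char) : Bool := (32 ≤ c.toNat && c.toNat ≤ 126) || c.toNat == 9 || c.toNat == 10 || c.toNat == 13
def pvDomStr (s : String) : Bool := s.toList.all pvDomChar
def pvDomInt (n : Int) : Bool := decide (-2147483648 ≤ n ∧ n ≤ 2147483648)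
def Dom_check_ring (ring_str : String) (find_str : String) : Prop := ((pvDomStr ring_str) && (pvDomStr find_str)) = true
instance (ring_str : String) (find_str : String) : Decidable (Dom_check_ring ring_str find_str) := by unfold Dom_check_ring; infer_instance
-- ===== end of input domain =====

-- B replaces A's circular sliding-window loop by a length guard plus one substring
-- search of find_str in ring_str+ring_str (objective: faster).


-- ===== PORT A =====
-- A's for-loop: the state is cur_list; 'break' returns True, falling off the range returns False.
-- ring_str[i % limit] is PySem.List.pyGet? ∘ PySem.Int.mod; the .getD 'a' default is reached
-- only where Python raises (excluded by Pre_).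
def checkRingLoop (ring find : List Char) (limit : Int) :
    List Int → List Char → Bool
  | [], _ => false
  | i :: rest, cur =>
    if cur = find then true
    else checkRingLoop ring find limit rest
      (cur.drop 1 ++ [(PySem.List.pyGet? ring (PySem.Int.mod i limit)).getD 'a'])

def check_ring (ring_str : String) (find_str : String) : Bool :=
  let ring := ring_str.toList
  let find := find_str.toList
  let limit : Int := ring.length
  let find_cnt : Int := find.length
  let cur := PySem.List.slice ring none (some find_cnt)   -- list(ring_str)[:find_cnt]
  checkRingLoop ring find limit
    (PySem.List.pyRange find_cnt (limit + find_cnt + 1) 1) cur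

-- ===== PORT B =====
def check_ring_alt (ring_str : String) (find_str : String) : Bool :=
  let r := ring_str.toList
  let f := find_str.toList
  decide (f.length ≤ r.length) && PySem.Chars.isIn f (r ++ r)

-- ===== PRECONDITION & SPEC =====
-- Pre_ excludes exactly the inputs where A raises IndexError (pop from an empty list):
-- an empty ring with a non-empty pattern.
def Pre_check_ring (ring_str : String) (find_str : String) : Prop :=
  ring_str = "" → find_str = ""
instance (ring_str : String) (find_str : String) : Decidable (Pre_check_ring ring_str find_str) := by unfold Pre_check_ring; infer_instance
def pvWitness_check_ring : String × String := ("abcab", "ca")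

def Spec_check_ring (ring_str : String) (find_str : String) (out : Bool) : Prop := out = check_ring_alt ring_str find_str
instance (ring_str : String) (find_str : String) (out : Bool) : Decidable (Spec_check_ring ring_str find_str out) := by unfold Spec_check_ring; infer_instance

-- ===== CLAIM (what is proved, stated in full; the proofs are below) =====
def Claim_equal_check_ring : Prop := ∀ (ring_str : String) (find_str : String), Dom_check_ring ring_str find_str → Pre_check_ring ring_str find_str → Spec_check_ring ring_str find_str (check_ring ring_str find_str)

-- ===== LEMMAS AND PROOFS =====

-- the circular window of length m starting at position t (an invariant label for A's cur_list)
def pvWindow (r : List Char) (m t : Nat) : List Char :=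
  (List.range m).map (fun j => r.getD ((t + j) % r.length) 'a')

-- when find_str is longer than the ring, cur_list keeps length len(ring) ≠ len(find) forever
theorem loop_len_ne (r f : List Char) (hr : r ≠ []) (hne : r.length ≠ f.length) :
    ∀ (L : List Int) (cur : List Char), cur.length = r.length →
      checkRingLoop r f (r.length : Int) L cur = false := by
  intro L
  induction L with
  | nil => intro cur _; rfl
  | cons i rest ih =>
    intro cur hlen
    have hcf : cur ≠ f := by
      intro h; apply hne; rw [← hlen, h]
    have hc : cur ≠ [] := by
      intro h; subst h; simp at hlen; exact hr (List.eq_nil_of_length_eq_zero hlen.symm)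
    simp only [checkRingLoop, if_neg hcf]
    apply ih
    have : 0 < cur.length := List.length_pos_iff.mpr hc
    simp; omega

theorem getElem_doubled (r : List Char) (i : Nat) (h : i < r.length + r.length) :
    (r ++ r)[i]'(by simp; omega) = r[i % r.length]'(by
      have : 0 < r.length := by omega
      exact Nat.mod_lt _ this) := by
  rcases Nat.lt_or_ge i r.length with hi | hi
  · rw [List.getElem_append_left hi]
    congr 1; exact (Nat.mod_eq_of_lt hi).symm
  · rw [List.getElem_append_right hi]
    congr 1
    have h2 : i - r.length < r.length := by omega
    rw [Nat.mod_eq_sub_mod hi, Nat.mod_eq_of_lt h2]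

theorem window_mod (r : List Char) (m t : Nat) :
    pvWindow r m (t % r.length) = pvWindow r m t := by
  simp [pvWindow, Nat.mod_add_mod]

theorem window_eq_doubled (r : List Char) (m u : Nat) (hm : m ≤ r.length)
    (hu : u + m ≤ r.length + r.length) :
    pvWindow r m u = ((r ++ r).drop u).take m := by
  apply List.ext_getElem
  · simp [pvWindow]; omega
  · intro j h1 h2
    have hj : j < m := by simpa [pvWindow] using h1
    have hlt : u + j < r.length + r.length := by omega
    have hn' : 0 < r.length := by omega
    simp only [pvWindow, List.getElem_map, List.getElem_range, List.getElem_take, List.getElem_drop]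
    rw [List.getD_eq_getElem r 'a' (Nat.mod_lt _ hn')]
    exact (getElem_doubled r (u + j) hlt).symm

theorem window_zero (r : List Char) (m : Nat) (hm : m ≤ r.length) :
    pvWindow r m 0 = r.take m := by
  apply List.ext_getElem
  · simp [pvWindow]; omega
  · intro j h1 h2
    have hj : j < m := by simpa [pvWindow] using h1
    have hn' : 0 < r.length := by omega
    simp only [pvWindow, List.getElem_map, List.getElem_range, List.getElem_take]
    rw [List.getD_eq_getElem r 'a' (by exact Nat.mod_lt _ hn')]
    congr 1
    rw [Nat.zero_add, Nat.mod_eq_of_lt (by omega)]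

-- one step of A's loop advances the window by one position
theorem window_step (r : List Char) (m t : Nat) (hm : 0 < m) :
    (pvWindow r m t).drop 1 ++ [r.getD ((m + t) % r.length) 'a'] = pvWindow r m (t + 1) := by
  apply List.ext_getElem
  · simp [pvWindow]; omega
  · intro i h1 h2
    have hi : i < m := by simpa [pvWindow] using h2
    have hlen : ((pvWindow r m t).drop 1).length = m - 1 := by simp [pvWindow]
    rcases Nat.lt_or_ge i (m - 1) with hlt | hge
    · rw [List.getElem_append_left (by omega)]
      simp only [List.getElem_drop, pvWindow, List.getElem_map, List.getElem_range]
      congr 2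
      omega
    · rw [List.getElem_append_right (by omega)]
      simp only [pvWindow, List.getElem_map, List.getElem_range]
      have : i = m - 1 := by omega
      subst this
      simp only [List.getElem_singleton]
      congr 2
      omega

-- A's loop returns True iff some circular window in positions t..len(ring) equals find
theorem loop_window_iff (r f : List Char) (hr : 0 < r.length) (hm : 0 < f.length) :
    ∀ (k t : Nat), t + k = r.length + 1 →
      (checkRingLoop r f (r.length : Int)
        (PySem.List.pyRange ((f.length : Int) + t) ((r.length : Int) + f.length + 1) 1)
        (pvWindow r f.length t) = true
       ↔ ∃ u, t ≤ u ∧ u ≤ r.length ∧ pvWindow r f.length u = f) := by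
  intro k
  induction k with
  | zero =>
    intro t ht
    rw [PySem.List.pyRange_one_eq_nil (by omega)]
    simp only [checkRingLoop]
    constructor
    · intro h; cases h
    · rintro ⟨u, h1, h2, _⟩; omega
  | succ k ih =>
    intro t ht
    rw [PySem.List.pyRange_one_cons (by omega)]
    simp only [checkRingLoop]
    by_cases hw : pvWindow r f.length t = f
    · rw [if_pos hw]
      simp only [true_iff]
      exact ⟨t, le_refl _, by omega, hw⟩
    · rw [if_neg hw]
      have hcast : (f.length : Int) + t + 1 = (f.length : Int) + (t + 1 : Nat) := by push_cast; omega
      have hmod : PySem.Int.mod ((f.length : Int) + t) (r.length : Int)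
          = (((f.length + t) % r.length : Nat) : Int) := by
        have : ((f.length : Int) + t) = ((f.length + t : Nat) : Int) := by push_cast; omega
        rw [this]; exact PySem.Int.mod_natCast _ _
      have hget : (PySem.List.pyGet? r (PySem.Int.mod ((f.length : Int) + t) (r.length : Int))).getD 'a'
          = r.getD ((f.length + t) % r.length) 'a' := by
        rw [hmod, PySem.List.pyGet?_natCast]
        have hlt : (f.length + t) % r.length < r.length := Nat.mod_lt _ hr
        rw [List.getElem?_eq_getElem hlt, List.getD_eq_getElem r 'a' hlt]
        rfl
      rw [hget, window_step r f.length t hm, hcast]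
      rw [ih (t + 1) (by omega)]
      constructor
      · rintro ⟨u, h1, h2, h3⟩; exact ⟨u, by omega, h2, h3⟩
      · rintro ⟨u, h1, h2, h3⟩
        refine ⟨u, ?_, h2, h3⟩
        rcases Nat.eq_or_lt_of_le h1 with rfl | h
        · exact absurd h3 hw
        · omega

-- B's substring test on the doubled ring finds exactly the circular windows
theorem isIn_iff_window (r f : List Char) (hr : 0 < r.length) (hmn : f.length ≤ r.length) :
    (PySem.Chars.isIn f (r ++ r) = true ↔ ∃ u, u ≤ r.length ∧ pvWindow r f.length u = f) := by
  rw [← PySem.Chars.exists_prefix_drop_iff_isIn]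
  by_cases hm : f.length = 0
  · have hf : f = [] := List.eq_nil_of_length_eq_zero hm
    subst hf
    constructor
    · intro _; exact ⟨0, by omega, by simp [pvWindow]⟩
    · intro _; exact ⟨0, by simp⟩
  · constructor
    · rintro ⟨j, hpre⟩
      have hlen : f.length ≤ ((r ++ r).drop j).length := hpre.length_le
      have hjb : j + f.length ≤ r.length + r.length := by
        simp [List.length_drop] at hlen; omega
      have hfeq : f = ((r ++ r).drop j).take f.length := List.prefix_iff_eq_take.mp hpre
      refine ⟨j % r.length, le_of_lt (Nat.mod_lt _ hr), ?_⟩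
      rw [window_mod, window_eq_doubled r f.length j hmn hjb]; exact hfeq.symm
    · rintro ⟨u, hu, hw⟩
      refine ⟨u, ?_⟩
      rw [← hw, window_eq_doubled r f.length u hmn (by omega)]
      exact List.take_prefix _ _

-- ===== VERDICT (by name: the statement is the Claim_ definition above) =====
theorem check_ring_spec : Claim_equal_check_ring := by
  intro rs fs _hdom hpre
  unfold Spec_check_ring check_ring check_ring_alt
  simp only [PySem.List.slice_to_natCast]
  set r := rs.toList with hr
  set f := fs.toList with hf
  by_cases hm0 : f.length = 0
  · -- empty find_str: A breaks at the first check; B: '' in anything is True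
    have hfnil : f = [] := List.eq_nil_of_length_eq_zero hm0
    rw [hfnil]
    rw [PySem.List.pyRange_one_cons (by omega)]
    simp [checkRingLoop, PySem.Chars.isIn_nil]
  · have hrne : r ≠ [] := by
      intro h
      have : rs = "" := by
        rw [hr] at h
        exact (String.toList_eq_nil_iff.mp h)
      have : fs = "" := hpre this
      apply hm0; rw [hf, this]; rfl
    have hrpos : 0 < r.length := List.length_pos_iff.mpr hrne
    rcases le_or_gt f.length r.length with hmn | hmn
    · -- the main case: window loop vs substring search on the doubled ring
      have hA := loop_window_iff r f hrpos (by omega) (r.length + 1) 0 (by omega)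
      simp only [Nat.cast_zero, add_zero] at hA
      rw [window_zero r f.length hmn] at hA
      have hB := isIn_iff_window r f hrpos hmn
      rw [Bool.eq_iff_iff]
      rw [hA]
      rw [Bool.and_eq_true, decide_eq_true_iff, hB]
      constructor
      · rintro ⟨u, _, h2, h3⟩; exact ⟨hmn, u, h2, h3⟩
      · rintro ⟨_, u, h2, h3⟩; exact ⟨u, by omega, h2, h3⟩
    · -- find_str longer than the ring: cur_list can never match; B's length guard is false
      have htake : r.take f.length = r := List.take_of_length_le (by omega)
      rw [htake]
      rw [loop_len_ne r f hrne (by omega) _ r rfl]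
      have : ¬ (f.length ≤ r.length) := by omega
      simp [this]
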